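-- pv_equiv track=rewrite | github.com/sophiacphilips/row_puzzle.py | row_puzzle.py | row_puzzle_helper
-- ===== SOURCE A (Python) =====
-- def row_puzzle_helper(pos, row):
--     if pos<0: #base case
--         return False
--     if pos>=len(row): #base case
--         return False
--     if row[pos]==-1: #base case
--         return False
--     if pos==(len(row)-1): #if value of number in row is less than the length of the row then puzzle is possible
--         return True
--     place_holder = row[pos] #place_holder used to hold current position of integer in row
--     row[pos]=-1
--     return row_puzzle_helper(pos+place_holder,row)|row_puzzle_helper(pos-place_holder,row) #adds or subtracts place holder from its
-- ===== SOURCE B (Python) =====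
-- def row_puzzle_helper(pos, row):
--     found = False
--     stack = [pos]
--     while stack:
--         p = stack.pop()
--         if p < 0 or p >= len(row) or row[p] == -1:
--             continue
--         if p == len(row) - 1:
--             found = True
--             continue
--         ph = row[p]
--         row[p] = -1
--         stack.append(p - ph)
--         stack.append(p + ph)
--     return found
-- ===== Notes on version B (the rewrite author's own statement) =====
-- stated objective: alternative
-- what changed: Replaces the binary recursion with an iterative DFS using an explicit LIFO stack and a found flag, with the same in-place marking of visited cells.
import Mathlib
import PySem

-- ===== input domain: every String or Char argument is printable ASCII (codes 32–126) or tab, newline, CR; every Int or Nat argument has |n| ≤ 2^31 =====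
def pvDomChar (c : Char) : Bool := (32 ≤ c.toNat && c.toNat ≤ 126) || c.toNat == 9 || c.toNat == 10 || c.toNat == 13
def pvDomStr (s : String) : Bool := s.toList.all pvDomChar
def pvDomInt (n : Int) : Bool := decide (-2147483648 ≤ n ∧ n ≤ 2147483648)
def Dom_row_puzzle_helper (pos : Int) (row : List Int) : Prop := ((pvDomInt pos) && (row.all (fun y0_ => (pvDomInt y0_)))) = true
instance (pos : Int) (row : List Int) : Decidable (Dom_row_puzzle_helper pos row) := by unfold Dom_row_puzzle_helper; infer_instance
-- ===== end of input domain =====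

-- B replaces A's binary recursion by an iterative DFS with an explicit stack and a found flag.
-- Both Pythons mutate `row` in place (identically); the equivalence proved here is about the RETURN value.
-- Both ports thread the mutated row explicitly; the Nat fuel is only a totality guard
-- (pvAlive row + 1 recursion depth for A, 2*pvAlive row + 2 stack pops for B — always sufficient,
-- since every recursive step / expanding pop marks one more alive cell with -1).

-- number of cells not yet marked -1 (the termination measure of the in-place marking)
def pvAlive (row : List Int) : Nat := (row.filter (fun x => x ≠ -1)).length

-- ===== PORT A =====
-- literal port of A's recursion; indexing row[pos] is guarded (0 ≤ pos < len) so getD is exact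
def pvHelpA : Nat → Int → List Int → Bool × List Int
  | 0, _, row => (false, row)
  | fuel+1, pos, row =>
    if pos < 0 then (false, row)
    else if (row.length : Int) ≤ pos then (false, row)
    else if row.getD pos.toNat 0 = -1 then (false, row)
    else if pos = (row.length : Int) - 1 then (true, row)
    else
      let v := row.getD pos.toNat 0
      let row' := row.set pos.toNat (-1)
      let p1 := pvHelpA fuel (pos + v) row'
      let p2 := pvHelpA fuel (pos - v) p1.2
      (p1.1 || p2.1, p2.2)

def row_puzzle_helper (pos : Int) (row : List Int) : Bool :=
  (pvHelpA (pvAlive row + 1) pos row).1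

-- ===== PORT B =====
-- literal port of B's while loop over (stack, row, found)
def pvRunB : Nat → List Int → List Int → Bool → Bool × List Int
  | 0, _, row, found => (found, row)
  | _+1, [], row, found => (found, row)
  | fuel+1, p :: s, row, found =>
    if p < 0 ∨ (row.length : Int) ≤ p ∨ row.getD p.toNat 0 = -1 then
      pvRunB fuel s row found
    else if p = (row.length : Int) - 1 then
      pvRunB fuel s row true
    else
      let ph := row.getD p.toNat 0
      pvRunB fuel ((p + ph) :: (p - ph) :: s) (row.set p.toNat (-1)) found

def row_puzzle_helper_alt (pos : Int) (row : List Int) : Bool :=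
  (pvRunB (2 * pvAlive row + 2) [pos] row false).1

-- ===== PRECONDITION & SPEC =====
def Spec_row_puzzle_helper (pos : Int) (row : List Int) (out : Bool) : Prop := out = row_puzzle_helper_alt pos row
instance (pos : Int) (row : List Int) (out : Bool) : Decidable (Spec_row_puzzle_helper pos row out) := by unfold Spec_row_puzzle_helper; infer_instance

-- ===== CLAIM (what is proved, stated in full; the proofs are below) =====
def Claim_equal_row_puzzle_helper : Prop := ∀ (pos : Int) (row : List Int), Dom_row_puzzle_helper pos row → Spec_row_puzzle_helper pos row (row_puzzle_helper pos row)

-- ===== LEMMAS AND PROOFS =====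

-- setting any cell to -1 never increases the alive count
theorem pvAlive_set_le (row : List Int) (i : Nat) :
    pvAlive (row.set i (-1)) ≤ pvAlive row := by
  induction row generalizing i with
  | nil => simp [pvAlive]
  | cons a t ih =>
    cases i with
    | zero => simp [pvAlive, List.filter]; split <;> simp_all [pvAlive]
    | succ j =>
      simp only [List.set, pvAlive, List.filter]
      split <;> simpa [pvAlive] using ih j

-- setting an alive in-range cell to -1 decreases the alive count by exactly one
theorem pvAlive_set_eq (row : List Int) (i : Nat) (hi : i < row.length)
    (hv : row.getD i 0 ≠ -1) :
    pvAlive (row.set i (-1)) + 1 = pvAlive row := by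
  induction row generalizing i with
  | nil => simp at hi
  | cons a t ih =>
    cases i with
    | zero =>
      simp at hv
      simp [pvAlive, List.filter, hv]
    | succ j =>
      simp at hi hv
      have := ih j hi hv
      simp only [List.set, pvAlive, List.filter]
      split <;> simp [pvAlive] at this ⊢ <;> omega

-- A's recursion never increases the alive count
theorem pvHelpA_alive_le : ∀ (f : Nat) (pos : Int) (row : List Int),
    pvAlive (pvHelpA f pos row).2 ≤ pvAlive row := by
  intro f
  induction f with
  | zero => intro pos row; simp [pvHelpA]
  | succ f ih =>
    intro pos row
    simp only [pvHelpA]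
    split
    · simp
    split
    · simp
    split
    · simp
    split
    · simp
    · calc pvAlive (pvHelpA f (pos - row.getD pos.toNat 0)
              (pvHelpA f (pos + row.getD pos.toNat 0) (row.set pos.toNat (-1))).2).2
          ≤ pvAlive (pvHelpA f (pos + row.getD pos.toNat 0) (row.set pos.toNat (-1))).2 := ih _ _
        _ ≤ pvAlive (row.set pos.toNat (-1)) := ih _ _
        _ ≤ pvAlive row := pvAlive_set_le _ _

-- A's recursion is fuel-insensitive once the fuel exceeds the alive count
theorem pvHelpA_fuel : ∀ (f g : Nat) (pos : Int) (row : List Int),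
    pvAlive row < f → pvAlive row < g → pvHelpA f pos row = pvHelpA g pos row := by
  intro f
  induction f with
  | zero => intro g pos row h; omega
  | succ f ih =>
    intro g pos row hf hg
    cases g with
    | zero => omega
    | succ g =>
      simp only [pvHelpA]
      split
      · rfl
      split
      · rfl
      split
      · rfl
      split
      · rfl
      · rename_i h1 h2 h3 h4
        have hlt : pos.toNat < row.length := by omega
        have halive : pvAlive (row.set pos.toNat (-1)) + 1 = pvAlive row :=
          pvAlive_set_eq row pos.toNat hlt h3
        have h1' : pvAlive (row.set pos.toNat (-1)) < f := by omega
        have h1g : pvAlive (row.set pos.toNat (-1)) < g := by omega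
        have e1 : pvHelpA f (pos + row.getD pos.toNat 0) (row.set pos.toNat (-1)) =
                  pvHelpA g (pos + row.getD pos.toNat 0) (row.set pos.toNat (-1)) :=
          ih g _ _ h1' h1g
        rw [e1]
        have hr1 : pvAlive (pvHelpA g (pos + row.getD pos.toNat 0) (row.set pos.toNat (-1))).2
              ≤ pvAlive (row.set pos.toNat (-1)) := by
          rw [← e1]; exact pvHelpA_alive_le f _ _
        have e2 := ih g (pos - row.getD pos.toNat 0)
          (pvHelpA g (pos + row.getD pos.toNat 0) (row.set pos.toNat (-1))).2
          (by omega) (by omega)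
        rw [e2]

-- the canonical (fuel-saturated) form of A's recursion, used only in the proofs
def pvA (pos : Int) (row : List Int) : Bool × List Int := pvHelpA (pvAlive row + 1) pos row

theorem pvA_alive_le (pos : Int) (row : List Int) : pvAlive (pvA pos row).2 ≤ pvAlive row :=
  pvHelpA_alive_le _ _ _

-- the stack machine, run with exactly sufficient fuel, simulates one call of A's recursion
theorem pvSim : ∀ (n : Nat) (pos : Int) (row : List Int) (s : List Int) (found : Bool),
    pvAlive row < n →
    pvRunB (s.length + 2 * pvAlive row + 2) (pos :: s) row found =
      pvRunB (s.length + 2 * pvAlive (pvA pos row).2 + 1) s (pvA pos row).2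
        (found || (pvA pos row).1) := by
  intro n
  induction n with
  | zero => intro pos row s found h; omega
  | succ n ih =>
    intro pos row s found _h
    set F := s.length + 2 * pvAlive row + 1 with hF
    rw [show s.length + 2 * pvAlive row + 2 = F + 1 from rfl]
    by_cases hb : pos < 0 ∨ (row.length : Int) ≤ pos ∨ row.getD pos.toNat 0 = -1
    · -- dead pop; pvA returns (false, row)
      have hA : pvA pos row = (false, row) := by
        simp only [pvA, pvHelpA]
        rcases hb with h | h | h
        · simp [h]
        · rw [if_neg (by omega), if_pos h]
        · by_cases h0 : pos < 0
          · simp [h0]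
          · by_cases h1 : (row.length : Int) ≤ pos
            · rw [if_neg h0, if_pos h1]
            · rw [if_neg h0, if_neg h1, if_pos h]
      simp only [pvRunB]
      rw [if_pos hb, hA]
      simp only [Bool.or_false]
      rw [hF]
    · push_neg at hb
      obtain ⟨h0, h1, h2⟩ := hb
      have hbne : ¬ (pos < 0 ∨ (row.length : Int) ≤ pos ∨ row.getD pos.toNat 0 = -1) := by
        push_neg; exact ⟨h0, h1, h2⟩
      by_cases ht : pos = (row.length : Int) - 1
      · -- target pop; pvA returns (true, row)
        have hA : pvA pos row = (true, row) := by
          simp only [pvA, pvHelpA]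
          rw [if_neg (by omega), if_neg (by omega), if_neg h2, if_pos ht]
        simp only [pvRunB]
        rw [if_neg hbne, if_pos ht, hA]
        simp only [Bool.or_true]
        rw [hF]
      · -- expanding pop
        have hlt : pos.toNat < row.length := by omega
        have halive : pvAlive (row.set pos.toNat (-1)) + 1 = pvAlive row :=
          pvAlive_set_eq row pos.toNat hlt h2
        simp only [pvRunB]
        rw [if_neg hbne, if_neg ht]
        rw [hF, show s.length + 2 * pvAlive row + 1 =
          ((pos - row.getD pos.toNat 0) :: s).length
            + 2 * pvAlive (row.set pos.toNat (-1)) + 2 from by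
            simp only [List.length_cons]; omega]
        rw [ih (pos + row.getD pos.toNat 0) (row.set pos.toNat (-1))
            ((pos - row.getD pos.toNat 0) :: s) found (by omega)]
        have hA1 : pvAlive (pvA (pos + row.getD pos.toNat 0) (row.set pos.toNat (-1))).2
            ≤ pvAlive (row.set pos.toNat (-1)) := pvA_alive_le _ _
        rw [show ((pos - row.getD pos.toNat 0) :: s).length
              + 2 * pvAlive (pvA (pos + row.getD pos.toNat 0) (row.set pos.toNat (-1))).2 + 1
            = s.length
              + 2 * pvAlive (pvA (pos + row.getD pos.toNat 0) (row.set pos.toNat (-1))).2 + 2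
            from by simp only [List.length_cons]; omega]
        rw [ih (pos - row.getD pos.toNat 0)
            (pvA (pos + row.getD pos.toNat 0) (row.set pos.toNat (-1))).2 s
            (found || (pvA (pos + row.getD pos.toNat 0) (row.set pos.toNat (-1))).1)
            (by omega)]
        -- compute pvA pos row through one unfolding of A's recursion
        have hAeq : pvA pos row =
            ((pvA (pos + row.getD pos.toNat 0) (row.set pos.toNat (-1))).1 ||
             (pvA (pos - row.getD pos.toNat 0)
                (pvA (pos + row.getD pos.toNat 0) (row.set pos.toNat (-1))).2).1,
             (pvA (pos - row.getD pos.toNat 0)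
                (pvA (pos + row.getD pos.toNat 0) (row.set pos.toNat (-1))).2).2) := by
          show pvHelpA (pvAlive row + 1) pos row = _
          simp only [pvHelpA]
          rw [if_neg (by omega), if_neg (by omega), if_neg h2, if_neg ht]
          have e1 : pvHelpA (pvAlive row) (pos + row.getD pos.toNat 0) (row.set pos.toNat (-1)) =
              pvA (pos + row.getD pos.toNat 0) (row.set pos.toNat (-1)) :=
            pvHelpA_fuel _ _ _ _ (by omega) (by omega)
          rw [e1]
          have e2 : pvHelpA (pvAlive row) (pos - row.getD pos.toNat 0)
                (pvA (pos + row.getD pos.toNat 0) (row.set pos.toNat (-1))).2 =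
              pvA (pos - row.getD pos.toNat 0)
                (pvA (pos + row.getD pos.toNat 0) (row.set pos.toNat (-1))).2 :=
            pvHelpA_fuel _ _ _ _ (by omega) (by omega)
          rw [e2]
        rw [hAeq]
        simp only [Bool.or_assoc]

-- ===== VERDICT (by name: the statement is the Claim_ definition above) =====
theorem row_puzzle_helper_spec : Claim_equal_row_puzzle_helper := by
  intro pos row _
  unfold Spec_row_puzzle_helper row_puzzle_helper row_puzzle_helper_alt
  have h := pvSim (pvAlive row + 1) pos row [] false (by omega)
  simp only [List.length_nil, Nat.zero_add] at h
  rw [h]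
  have : ∀ (k : Nat) (r : List Int) (b : Bool), (pvRunB (k + 1) [] r b).1 = b := by
    intro k r b
    simp [pvRunB]
  rw [show 2 * pvAlive (pvA pos row).2 + 1 = (2 * pvAlive (pvA pos row).2) + 1 from rfl]
  rw [this]
  simp [pvA]
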